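-- pv_equiv track=rewrite | github.com/JungDayoon/AlgorithmStudy | Programmers/[42626] 더 맵게/n__aj22/42626.py | solution
-- ===== SOURCE A (Python) =====
-- import heapq
--
-- def solution(scoville, K):
--     answer = 0
--     heapq.heapify(scoville)
--     while(True):
--         if(scoville[0]>=K):
--             break
--         if len(scoville)<2:
--             return -1
--         n1 = heapq.heappop(scoville)
--         n2 = heapq.heappop(scoville)
--         heapq.heappush(scoville, n1+n2*2)
--         answer+=1
--     return answer
-- ===== SOURCE B (Python) =====
-- def solution(scoville, K):
--     # Sorted-list strategy: sort once, then repeatedly take the two front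
--     # (smallest) elements and insert the mix back at its sorted position.
--     # Note: unlike A (which heapifies scoville in place), B does not mutate
--     # its argument; the equivalence claimed is about the return value only.
--     s = sorted(scoville)
--     answer = 0
--     while True:
--         if s[0] >= K:
--             return answer
--         if len(s) < 2:
--             return -1
--         n1 = s.pop(0)
--         n2 = s.pop(0)
--         v = n1 + 2 * n2
--         i = 0
--         while i < len(s) and s[i] < v:
--             i += 1
--         s.insert(i, v)
--         answer += 1
-- ===== Notes on version B (the rewrite author's own statement) =====
-- stated objective: alternative
-- what changed: Replaces the binary heap (heapify/heappop/heappush) by a list sorted once up front, popping the two head elements and re-inserting the mix at its sorted position each round.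
import Mathlib
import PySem

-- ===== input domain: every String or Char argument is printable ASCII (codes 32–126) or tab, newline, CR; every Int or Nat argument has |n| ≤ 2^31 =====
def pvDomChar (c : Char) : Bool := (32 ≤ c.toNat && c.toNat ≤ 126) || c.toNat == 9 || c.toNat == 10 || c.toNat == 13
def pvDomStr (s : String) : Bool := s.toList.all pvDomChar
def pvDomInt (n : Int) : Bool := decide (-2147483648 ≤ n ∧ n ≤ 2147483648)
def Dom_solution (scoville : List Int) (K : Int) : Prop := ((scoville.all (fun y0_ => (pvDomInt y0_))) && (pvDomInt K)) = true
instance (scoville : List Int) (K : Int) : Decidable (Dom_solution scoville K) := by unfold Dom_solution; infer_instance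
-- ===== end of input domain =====

-- B replaces A's binary heap by a list sorted once with ordered re-insertion of each mix
-- (alternative data structure); equivalence is about the RETURN value only — A heapifies
-- the argument in place, B does not mutate it.

-- ===== PORT A =====
-- heapq is ported by its library semantics on values: heappop removes (the first
-- occurrence of) the minimum value, heappush appends; the heap's internal array
-- layout is unobservable in the return value.  mixA is A's while-loop.
def mixA (h : List Int) (K : Int) (answer : Int) : Int :=
  match hm : h.min? with
  | none => 0    -- scoville[0] raises IndexError on an empty heap; excluded by Pre_
  | some m =>
    if m ≥ K then answer
    else if h.length < 2 then -1
    else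
      match hm2 : (h.erase m).min? with
      | none => 0    -- unreachable: h.erase m is nonempty since h.length ≥ 2
      | some m2 =>
        mixA (((h.erase m).erase m2) ++ [m + m2 * 2]) K (answer + 1)
termination_by h.length
decreasing_by
  have h1 : m ∈ h := List.min?_mem hm
  have h2 : m2 ∈ h.erase m := List.min?_mem hm2
  have hl1 : 1 ≤ (h.erase m).length := List.length_pos_of_mem h2
  have hl2 : (h.erase m).length = h.length - 1 := List.length_erase_of_mem h1
  simp only [List.length_append, List.length_cons, List.length_nil,
    List.length_erase_of_mem h2]
  omega

def solution (scoville : List Int) (K : Int) : Int := mixA scoville K 0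

-- ===== PORT B =====
-- the inner while/insert of Source B: walk past smaller elements, insert v there
def insB (v : Int) : List Int → List Int
  | [] => [v]
  | x :: xs => if x < v then x :: insB v xs else v :: x :: xs

theorem length_insB (v : Int) (l : List Int) : (insB v l).length = l.length + 1 := by
  induction l with
  | nil => rfl
  | cons x xs ih => simp only [insB]; split <;> simp [ih]

def mixB (s : List Int) (K : Int) (answer : Int) : Int :=
  match s with
  | [] => 0    -- s[0] raises IndexError; excluded by Pre_
  | [x] => if x ≥ K then answer else -1
  | x :: y :: rest =>
      if x ≥ K then answer
      else mixB (insB (x + 2 * y) rest) K (answer + 1)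
termination_by s.length
decreasing_by simp [length_insB]

def solution_alt (scoville : List Int) (K : Int) : Int :=
  mixB (PySem.List.sorted scoville (fun x => x) false) K 0

-- ===== PRECONDITION & SPEC =====
-- A evaluates scoville[0] on the (possibly empty) heap: on [] it raises IndexError,
-- so Pre_ excludes exactly the empty list.
def Pre_solution (scoville : List Int) (K : Int) : Prop := scoville ≠ []
instance (scoville : List Int) (K : Int) : Decidable (Pre_solution scoville K) := by unfold Pre_solution; infer_instance
def pvWitness_solution : List Int × Int := ([1, 2, 3, 9, 10, 12], 7)
def Spec_solution (scoville : List Int) (K : Int) (out : Int) : Prop := out = solution_alt scoville K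
instance (scoville : List Int) (K : Int) (out : Int) : Decidable (Spec_solution scoville K out) := by unfold Spec_solution; infer_instance

-- ===== CLAIM =====
def Claim_equal_solution : Prop := ∀ (scoville : List Int) (K : Int), Dom_solution scoville K → Pre_solution scoville K → Spec_solution scoville K (solution scoville K)

-- ===== LEMMAS AND PROOFS =====
theorem perm_insB (v : Int) (l : List Int) : (insB v l).Perm (v :: l) := by
  induction l with
  | nil => simp [insB]
  | cons x xs ih =>
    simp only [insB]; split
    · exact ((ih.cons x).trans (List.Perm.swap v x xs))
    · exact List.Perm.refl _

theorem pairwise_insB (v : Int) (l : List Int) (hl : l.Pairwise (· ≤ ·)) :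
    (insB v l).Pairwise (· ≤ ·) := by
  induction l with
  | nil => simp [insB]
  | cons x xs ih =>
    simp only [insB]; split
    · rename_i hx
      rcases List.pairwise_cons.mp hl with ⟨hall, htail⟩
      refine List.pairwise_cons.mpr ⟨?_, ih htail⟩
      intro a ha
      rcases List.mem_cons.mp ((perm_insB v xs).mem_iff.mp ha) with h | h
      · subst h; omega
      · exact hall a h
    · rename_i hx
      rcases List.pairwise_cons.mp hl with ⟨hall, htail⟩
      refine List.pairwise_cons.mpr ⟨?_, hl⟩
      intro a ha
      rcases List.mem_cons.mp ha with h | h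
      · subst h; omega
      · exact le_trans (by omega) (hall a h)

-- head of a sorted list is the min? of any permutation of it
theorem min?_of_sorted_perm (x : Int) (s' h : List Int)
    (hperm : (x :: s').Perm h) (hsort : (x :: s').Pairwise (· ≤ ·)) :
    h.min? = some x := by
  rw [List.min?_eq_some_iff]
  constructor
  · exact hperm.mem_iff.mp (List.mem_cons_self ..)
  · intro b hb
    rcases List.mem_cons.mp (hperm.mem_iff.mpr hb) with h | h
    · omega
    · exact (List.pairwise_cons.mp hsort).1 b h

-- core loop equivalence: mixA on any list equals mixB on a sorted permutation of it
theorem mix_eq (n : Nat) : ∀ (l s : List Int) (K a : Int), l.length = n →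
    s.Perm l → s.Pairwise (· ≤ ·) → mixA l K a = mixB s K a := by
  induction n using Nat.strong_induction_on with
  | _ n ih =>
    intro l s K a hlen hperm hsort
    rcases s with _ | ⟨x, s'⟩
    · have : l = [] := hperm.symm.eq_nil
      subst this
      simp [mixA, mixB]
    · have hmin : l.min? = some x := min?_of_sorted_perm x s' l hperm hsort
      rw [mixA]
      split
      · rename_i heq; rw [hmin] at heq; cases heq
      · rename_i m heq
        rw [hmin] at heq
        cases heq
        by_cases hxK : x ≥ K
        · rcases s' with _ | ⟨y, rest⟩ <;> simp [mixB, hxK]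
        · rcases s' with _ | ⟨y, rest⟩
          · have h1 : l.length = 1 := by rw [← hperm.length_eq]; rfl
            simp [hxK, h1, mixB]
          · have hlen2 : l.length = rest.length + 2 := by rw [← hperm.length_eq]; simp
            have hnot : ¬ l.length < 2 := by omega
            -- erase x from l corresponds to the tail y :: rest
            have hperm1 : (y :: rest).Perm (l.erase x) := by
              have := hperm.erase x
              simpa using this
            have hsort1 : (y :: rest).Pairwise (· ≤ ·) := (List.pairwise_cons.mp hsort).2
            have hmin2 : (l.erase x).min? = some y := min?_of_sorted_perm y rest _ hperm1 hsort1
            simp only [hxK, if_false, hnot]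
            split
            · rename_i heq2; rw [hmin2] at heq2; cases heq2
            · rename_i m2 heq2
              rw [hmin2] at heq2
              cases heq2
              -- next states are permutations of each other
              have hperm2 : rest.Perm ((l.erase x).erase y) := by
                have := hperm1.erase y
                simpa using this
              have hpermN : (insB (x + 2 * y) rest).Perm (((l.erase x).erase y) ++ [x + y * 2]) := by
                have e : x + 2 * y = x + y * 2 := by ring
                exact e ▸ ((perm_insB _ rest).trans
                  ((hperm2.cons _).trans (List.perm_append_singleton _ _).symm))
              have hlenN : (((l.erase x).erase y) ++ [x + y * 2]).length = n - 1 := by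
                have hx : x ∈ l := hperm.mem_iff.mp (by simp)
                have hy : y ∈ l.erase x := hperm1.mem_iff.mp (by simp)
                have l1 : (l.erase x).length = l.length - 1 := List.length_erase_of_mem hx
                have l2 : ((l.erase x).erase y).length = (l.erase x).length - 1 := List.length_erase_of_mem hy
                simp only [List.length_append, List.length_cons, List.length_nil, l2, l1]
                omega
              have hsortN : (insB (x + 2 * y) rest).Pairwise (· ≤ ·) :=
                pairwise_insB _ _ (List.pairwise_cons.mp hsort1).2
              rw [mixB]
              simp only [hxK, if_false]
              exact ih (n - 1) (by omega) _ _ K (a + 1) hlenN hpermN hsortN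

-- ===== VERDICT =====
theorem solution_spec : Claim_equal_solution := by
  intro scoville K _ _
  unfold Spec_solution solution solution_alt
  exact mix_eq scoville.length scoville (PySem.List.sorted scoville (fun x => x) false) K 0
    rfl (PySem.List.sorted_perm ..) (by simpa using PySem.List.sorted_pairwise scoville (fun x => x))
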